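-- pv_equiv track=rewrite | github.com/MrBrantCode/unitest_baseline | mut_generate/mist_train_cf/cf_2164/solution.py | combined_list_factorial
-- ===== SOURCE A (Python) =====
-- def combined_list_factorial(list1, list2):
--     """
--     This function combines two lists by index, excluding values from list1 that are divisible by 3,
--     sorts the resulting list in descending order based on the sum of each pair of values,
--     and returns the sorted list along with the factorial of its length.
--
--     Args:
--         list1 (list): The first list.
--         list2 (list): The second list.
--
--     Returns:
--         list: A list containing the sorted pairs and the factorial of the length.
--     """
--
--     def factorial(n):
--         if n == 0:
--             return 1
--         else:
--             return n * factorial(n-1)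
--
--     combined_list = [pair for pair in zip(list1, list2) if pair[0] % 3 != 0]
--     combined_list.sort(key=lambda x: sum(x), reverse=True)
--
--     return combined_list, factorial(len(combined_list))
-- ===== SOURCE B (Python) =====
-- def combined_list_factorial(list1, list2):
--     # Same return value as the original: explicit accumulator loop instead of a
--     # comprehension, ascending sort on the negated sum instead of reverse=True,
--     # and an iterative product instead of recursion for the factorial.
--     pairs = []
--     for a, b in zip(list1, list2):
--         if a % 3:
--             pairs.append((a, b))
--     pairs = sorted(pairs, key=lambda p: -(p[0] + p[1]))
--     fact = 1
--     for i in range(2, len(pairs) + 1):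
--         fact *= i
--     return pairs, fact
-- ===== Notes on version B (the rewrite author's own statement) =====
-- stated objective: alternative
-- what changed: The filtered pairs are built with an explicit accumulator loop instead of a comprehension, the descending sort is expressed as a stable ascending sort on the negated sum instead of reverse=True, and the recursive factorial helper is replaced by an iterative running product over range(2, n+1).
import Mathlib
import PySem

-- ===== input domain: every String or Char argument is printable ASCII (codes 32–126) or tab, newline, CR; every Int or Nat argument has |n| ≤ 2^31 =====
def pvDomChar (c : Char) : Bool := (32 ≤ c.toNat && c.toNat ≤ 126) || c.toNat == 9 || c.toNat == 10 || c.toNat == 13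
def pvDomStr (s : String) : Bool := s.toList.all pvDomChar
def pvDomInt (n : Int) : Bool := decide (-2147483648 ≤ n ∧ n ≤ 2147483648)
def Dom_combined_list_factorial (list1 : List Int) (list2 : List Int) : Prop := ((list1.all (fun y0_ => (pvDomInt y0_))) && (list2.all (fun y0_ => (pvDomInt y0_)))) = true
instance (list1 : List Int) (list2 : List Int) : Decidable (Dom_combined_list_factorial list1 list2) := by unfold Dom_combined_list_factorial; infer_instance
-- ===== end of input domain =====

-- B builds the filtered pairs with an accumulator loop, sorts ascending on the
-- negated sum instead of reverse=True, and computes the factorial iteratively;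
-- same return value, alternative decomposition (no speed claim).


-- ===== PORT A =====
-- A's recursive factorial; in A it is only ever applied to len(combined_list),
-- a nonnegative count, so the helper recurses on that count (exact there).
def factorialA : Nat → Int
  | 0 => 1
  | n + 1 => ((n : Int) + 1) * factorialA n

def combined_list_factorial (list1 : List Int) (list2 : List Int) : (List (Int × Int)) × Int :=
  let combined := (list1.zip list2).filter (fun pair => PySem.Int.mod pair.1 3 != 0)
  let combined := PySem.List.sorted combined (fun x => x.1 + x.2) true
  (combined, factorialA combined.length)

-- ===== PORT B =====
def combined_list_factorial_alt (list1 : List Int) (list2 : List Int) : (List (Int × Int)) × Int :=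
  let pairs := (list1.zip list2).foldl
    (fun acc p => if PySem.Int.mod p.1 3 != 0 then acc ++ [p] else acc) []
  let pairs := PySem.List.sorted pairs (fun p => -(p.1 + p.2)) false
  let fact := (PySem.List.pyRange 2 ((pairs.length : Int) + 1) 1).foldl (fun acc i => acc * i) 1
  (pairs, fact)

-- ===== PRECONDITION & SPEC =====
def Spec_combined_list_factorial (list1 : List Int) (list2 : List Int) (out : (List (Int × Int)) × Int) : Prop := out = combined_list_factorial_alt list1 list2
instance (list1 : List Int) (list2 : List Int) (out : (List (Int × Int)) × Int) : Decidable (Spec_combined_list_factorial list1 list2 out) := by unfold Spec_combined_list_factorial; infer_instance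

-- ===== CLAIM (what is proved, stated in full; the proofs are below) =====
def Claim_equal_combined_list_factorial : Prop := ∀ (list1 : List Int) (list2 : List Int), Dom_combined_list_factorial list1 list2 → Spec_combined_list_factorial list1 list2 (combined_list_factorial list1 list2)

-- ===== LEMMAS AND PROOFS =====

-- reverse=True stable sort by key = stable ascending sort by the negated key
theorem sorted_rev_eq_sorted_neg (xs : List (Int × Int)) (k : Int × Int → Int) :
    PySem.List.sorted xs k true = PySem.List.sorted xs (fun x => -(k x)) false := by
  rw [PySem.List.sorted_rev_eq_foldl_insertBy, PySem.List.sorted_eq_foldl_insertBy]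
  congr 1
  funext acc x
  congr 1
  funext a b
  simp

-- the iterative product over range(2, n+1) is A's recursive factorial
theorem fact_loop_eq (n : Nat) :
    (PySem.List.pyRange 2 ((n : Int) + 1) 1).foldl (fun acc i => acc * i) 1 = factorialA n := by
  induction n with
  | zero => decide
  | succ m ih =>
    cases m with
    | zero => decide
    | succ k =>
      have h2 : (2 : Int) ≤ (k : Int) + 1 + 1 := by omega
      push_cast at ih ⊢
      rw [PySem.List.pyRange_one_succ_right h2, List.foldl_append, ih]
      simp [factorialA, mul_comm]

-- ===== VERDICT (by name: the statement is the Claim_ definition above) =====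
theorem combined_list_factorial_spec : Claim_equal_combined_list_factorial := by
  intro list1 list2 _
  unfold Spec_combined_list_factorial combined_list_factorial combined_list_factorial_alt
  simp only [PySem.List.foldl_append_if_eq_filter, List.nil_append,
    sorted_rev_eq_sorted_neg, fact_loop_eq]
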